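-- pv_equiv track=rewrite | github.com/Lsege/JUPythonHW | Hw_3/test.py | replace_cell
-- ===== SOURCE A (Python) =====
-- def replace_cell(grid, position, value):
-- 	count = 0
-- 	for i in range(len(grid)):
-- 		for j in range(len(grid[i])):
-- 			count += 1
-- 			if position == count:
-- 				grid[i][j] = value
-- 				return grid
-- ===== SOURCE B (Python) =====
-- def replace_cell(grid, position, value):
--     # Prefix-sum walk over rows instead of counting every cell one by one.
--     # Mutates grid in place like the original when the position exists.
--     if position < 1:
--         return None
--     offset = position
--     for i, row in enumerate(grid):
--         if offset <= len(row):
--             grid[i][offset - 1] = value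
--             return grid
--         offset -= len(row)
--     return None
-- ===== Notes on version B (the rewrite author's own statement) =====
-- stated objective: alternative
-- what changed: B walks rows subtracting row lengths (prefix sums) and indexes the column directly, instead of incrementing a counter once per cell.
import Mathlib
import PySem

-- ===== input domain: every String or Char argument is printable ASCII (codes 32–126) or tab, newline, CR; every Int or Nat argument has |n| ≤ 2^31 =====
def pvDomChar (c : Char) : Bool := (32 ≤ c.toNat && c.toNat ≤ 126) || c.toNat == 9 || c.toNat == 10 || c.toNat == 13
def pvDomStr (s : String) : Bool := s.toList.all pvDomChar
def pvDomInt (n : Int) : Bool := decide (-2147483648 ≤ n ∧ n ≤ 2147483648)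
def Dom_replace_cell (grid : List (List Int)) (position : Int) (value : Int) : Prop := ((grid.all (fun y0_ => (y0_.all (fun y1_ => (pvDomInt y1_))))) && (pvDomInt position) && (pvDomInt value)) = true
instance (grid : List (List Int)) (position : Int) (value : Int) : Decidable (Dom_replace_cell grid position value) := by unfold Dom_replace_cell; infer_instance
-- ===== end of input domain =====

-- B replaces A's per-cell counter with a prefix-sum walk over rows (subtract row lengths,
-- index the column directly): a genuinely different traversal of the same cost class (objective: alternative).
-- Both Pythons mutate the matched row in place; the equivalence proved here is about the return value
-- (B performs the same mutation as A).

-- ===== PORT A =====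
-- inner for-loop over one row: threads the cell counter; returns the modified row on hit
def replace_cell_inner (position value : Int) : List Int → Int → Option (List Int) × Int
  | [], count => (none, count)
  | x :: rest, count =>
      let count := count + 1
      if position == count then (some (value :: rest), count)
      else
        match replace_cell_inner position value rest count with
        | (o, c) => (o.map (fun r => x :: r), c)

-- outer for-loop over rows
def replace_cell_outer (position value : Int) : List (List Int) → Int → Option (List (List Int))
  | [], _ => none
  | row :: rest, count =>
      match replace_cell_inner position value row count with
      | (some row', _) => some (row' :: rest)
      | (none, c) => (replace_cell_outer position value rest c).map (fun g => row :: g)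

def replace_cell (grid : List (List Int)) (position : Int) (value : Int) : Option (List (List Int)) :=
  replace_cell_outer position value grid 0

-- ===== PORT B =====
-- walk the rows subtracting lengths; index the column directly (offset ≥ 1 is invariant)
def replace_cell_alt_go (value : Int) : List (List Int) → Int → Option (List (List Int))
  | [], _ => none
  | row :: rest, offset =>
      if offset ≤ (row.length : Int) then
        some (row.set (offset - 1).toNat value :: rest)
      else
        (replace_cell_alt_go value rest (offset - row.length)).map (fun g => row :: g)

def replace_cell_alt (grid : List (List Int)) (position : Int) (value : Int) : Option (List (List Int)) :=
  if position < 1 then none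
  else replace_cell_alt_go value grid position

-- ===== PRECONDITION & SPEC =====
def Spec_replace_cell (grid : List (List Int)) (position : Int) (value : Int) (out : Option (List (List Int))) : Prop := out = replace_cell_alt grid position value
instance (grid : List (List Int)) (position : Int) (value : Int) (out : Option (List (List Int))) : Decidable (Spec_replace_cell grid position value out) := by unfold Spec_replace_cell; infer_instance

-- ===== CLAIM (what is proved, stated in full; the proofs are below) =====
def Claim_equal_replace_cell : Prop := ∀ (grid : List (List Int)) (position : Int) (value : Int), Dom_replace_cell grid position value → Spec_replace_cell grid position value (replace_cell grid position value)

-- ===== LEMMAS AND PROOFS =====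

-- characterisation of A's inner loop: on a hit the counter stopped at position, otherwise it advanced by the row length
theorem inner_eq (position value : Int) (row : List Int) (count : Int) :
    replace_cell_inner position value row count =
      if 0 < position - count ∧ position - count ≤ (row.length : Int)
      then (some (row.set (position - count - 1).toNat value), position)
      else (none, count + row.length) := by
  induction row generalizing count with
  | nil =>
      simp only [replace_cell_inner, List.length_nil, Nat.cast_zero]
      rw [if_neg (by omega)]
      simp
  | cons x rest ih =>
      simp only [replace_cell_inner]
      by_cases h : position = count + 1
      · subst h
        simp only [beq_self_eq_true, if_true]
        rw [if_pos ⟨by omega, by simp only [List.length_cons]; push_cast; omega⟩]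
        simp [show (count + 1 - count - 1).toNat = 0 from by omega]
      · have hne : (position == count + 1) = false := by simp [h]
        simp only [hne, Bool.false_eq_true, if_false, ih (count + 1)]
        by_cases hc : 0 < position - (count + 1) ∧ position - (count + 1) ≤ (rest.length : Int)
        · rw [if_pos hc]
          have hc' : 0 < position - count ∧ position - count ≤ ((x :: rest).length : Int) := by
            simp only [List.length_cons]; push_cast; omega
          rw [if_pos hc']
          have h1 : (position - count - 1).toNat = (position - (count + 1) - 1).toNat + 1 := by omega
          simp [h1]
        · rw [if_neg hc]
          have hc' : ¬ (0 < position - count ∧ position - count ≤ ((x :: rest).length : Int)) := by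
            simp only [List.length_cons]; push_cast; omega
          rw [if_neg hc']
          simp only [Prod.mk.injEq, List.length_cons]
          refine ⟨rfl, ?_⟩
          push_cast; omega

-- A's outer loop returns none once position ≤ count (the counter only grows)
theorem outer_none (position value : Int) (grid : List (List Int)) (count : Int)
    (h : position ≤ count) :
    replace_cell_outer position value grid count = none := by
  induction grid generalizing count with
  | nil => rfl
  | cons row rest ih =>
      simp only [replace_cell_outer, inner_eq]
      rw [if_neg (by omega)]
      simp [ih (count + row.length) (by omega)]

-- A's outer loop agrees with B's prefix-sum walk, with offset = position - count
theorem outer_eq_go (position value : Int) (grid : List (List Int)) (count : Int)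
    (h : 1 ≤ position - count) :
    replace_cell_outer position value grid count =
      replace_cell_alt_go value grid (position - count) := by
  induction grid generalizing count with
  | nil => rfl
  | cons row rest ih =>
      simp only [replace_cell_outer, replace_cell_alt_go, inner_eq]
      by_cases hc : position - count ≤ (row.length : Int)
      · rw [if_pos ⟨by omega, hc⟩, if_pos hc]
      · rw [if_neg (by omega), if_neg hc]
        show Option.map (fun g => row :: g)
            (replace_cell_outer position value rest (count + row.length)) = _
        rw [show position - count - (row.length : Int) = position - (count + row.length) from by ring,
          ih (count + row.length) (by omega)]

-- ===== VERDICT (by name: the statement is the Claim_ definition above) =====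
theorem replace_cell_spec : Claim_equal_replace_cell := by
  intro grid position value _
  unfold Spec_replace_cell replace_cell replace_cell_alt
  by_cases h : position < 1
  · rw [if_pos h, outer_none position value grid 0 (by omega)]
  · rw [if_neg h]
    simpa using outer_eq_go position value grid 0 (by omega)
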